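-- pv_equiv track=rewrite | github.com/liyunze-coding/chess-playing-bot | lichess_main.py | on_castle
-- ===== SOURCE A (Python) =====
-- def on_castle(array, opponent_color):
--     queen_side = False
--     king_side = False
--     if opponent_color == 'black':
--         for c in array:
--             if c[0] == 'h8':
--                 king_side = True
--             if c[0] == 'a8':
--                 queen_side = True
--     elif opponent_color == 'white':
--         for c in array:
--             if c[0] == 'h1':
--                 king_side = True
--             if c[0] == 'a1':
--                 queen_side = True
--
--
--     new_array = array[:]
--     if king_side and opponent_color == 'black':
--         for index, array1 in enumerate(new_array):
--             if array1[0] != 'e8' and array1[0] != 'g8':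
--                 new_array[index] = []
--
--     elif queen_side and opponent_color == 'black':
--         for index, array1 in enumerate(new_array):
--             if array1[0] != 'e8' and array1[0] != 'c8':
--                 new_array[index] = []
--
--     elif king_side and opponent_color == 'white':
--         for index, array1 in enumerate(new_array):
--             if array1[0] != 'e1' and array1[0] != 'g1':
--                 new_array[index] = []
--     elif queen_side and opponent_color == 'white':
--         for index, array1 in enumerate(new_array):
--             if array1[0] != 'e1' and array1[0] != 'c1':
--                 new_array[index] = []
--
--     while [] in new_array: new_array.remove([])
--
--     return new_array
-- ===== SOURCE B (Python) =====
-- TABLE = {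
--     'black': ('h8', 'a8', 'e8', 'g8', 'c8'),
--     'white': ('h1', 'a1', 'e1', 'g1', 'c1'),
-- }
--
-- def on_castle(array, opponent_color):
--     entry = TABLE.get(opponent_color)
--     if entry is None:
--         return array[:]
--     kingrook, queenrook, king, kside, qside = entry
--     squares = {c[0] for c in array}
--     if kingrook in squares:
--         allowed = (king, kside)
--     elif queenrook in squares:
--         allowed = (king, qside)
--     else:
--         return array[:]
--     return [c for c in array if c[0] in allowed]
-- ===== Notes on version B (the rewrite author's own statement) =====
-- stated objective: simpler
-- what changed: Replaces A's four parallel blank-then-remove branches and duplicate flag loops with one per-color square table, a set of occupied squares and a single filtering pass.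
-- outside the precondition, e.g. on on_castle([[], ['a1']], 'green'): A returns [['a1']], B returns [[], ['a1']]
import Mathlib
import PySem

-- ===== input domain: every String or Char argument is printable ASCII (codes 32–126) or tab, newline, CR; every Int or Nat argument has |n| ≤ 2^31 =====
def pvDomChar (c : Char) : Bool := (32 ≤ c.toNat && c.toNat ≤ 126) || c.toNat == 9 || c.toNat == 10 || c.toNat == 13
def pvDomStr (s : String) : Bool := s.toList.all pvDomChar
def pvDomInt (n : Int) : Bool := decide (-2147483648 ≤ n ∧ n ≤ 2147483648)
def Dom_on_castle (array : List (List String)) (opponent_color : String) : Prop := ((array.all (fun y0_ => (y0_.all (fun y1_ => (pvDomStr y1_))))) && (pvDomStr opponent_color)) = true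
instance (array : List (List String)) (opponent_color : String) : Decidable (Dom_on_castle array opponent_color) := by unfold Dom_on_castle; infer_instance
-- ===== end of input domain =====

-- B replaces A's four parallel blank-then-remove branches with one per-color square
-- table, a set of occupied squares and a single filtering pass (objective: simpler).

-- c[0] under Pre_ (every element nonempty): exact there; total via getD
def pvFirst (c : List String) : String := (PySem.List.pyGet? c 0).getD ""

-- ===== PORT A =====
-- 'while [] in new_array: new_array.remove([])': removes every [] keeping order
def pvRemoveBlanks : List (List String) → List (List String)
  | [] => []
  | c :: rest => if c = [] then pvRemoveBlanks rest else c :: pvRemoveBlanks rest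

def on_castle (array : List (List String)) (opponent_color : String) : List (List String) :=
  -- the two flag loops, one pass each: state (king_side, queen_side)
  let flags : Bool × Bool :=
    if opponent_color = "black" then
      array.foldl (fun f c => (f.1 || pvFirst c = "h8", f.2 || pvFirst c = "a8")) (false, false)
    else if opponent_color = "white" then
      array.foldl (fun f c => (f.1 || pvFirst c = "h1", f.2 || pvFirst c = "a1")) (false, false)
    else (false, false)
  let king_side := flags.1
  let queen_side := flags.2
  -- new_array = array[:] then the four in-place blanking branches (each index written once)
  let new_array :=
    if king_side ∧ opponent_color = "black" then
      array.map (fun c => if pvFirst c ≠ "e8" ∧ pvFirst c ≠ "g8" then [] else c)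
    else if queen_side ∧ opponent_color = "black" then
      array.map (fun c => if pvFirst c ≠ "e8" ∧ pvFirst c ≠ "c8" then [] else c)
    else if king_side ∧ opponent_color = "white" then
      array.map (fun c => if pvFirst c ≠ "e1" ∧ pvFirst c ≠ "g1" then [] else c)
    else if queen_side ∧ opponent_color = "white" then
      array.map (fun c => if pvFirst c ≠ "e1" ∧ pvFirst c ≠ "c1" then [] else c)
    else array
  pvRemoveBlanks new_array

-- ===== PORT B =====
-- TABLE.get(opponent_color)
def pvTable (color : String) : Option (String × String × String × String × String) :=
  if color = "black" then some ("h8", "a8", "e8", "g8", "c8")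
  else if color = "white" then some ("h1", "a1", "e1", "g1", "c1")
  else none

def on_castle_alt (array : List (List String)) (opponent_color : String) : List (List String) :=
  match pvTable opponent_color with
  | none => array
  | some (kingrook, queenrook, king, kside, qside) =>
    let squares : PySem.Set String := PySem.Set.ofList (array.map pvFirst)
    if PySem.Set.contains squares kingrook then
      array.filter (fun c => pvFirst c = king || pvFirst c = kside)
    else if PySem.Set.contains squares queenrook then
      array.filter (fun c => pvFirst c = king || pvFirst c = qside)
    else array

-- ===== PRECONDITION & SPEC =====
-- Pre_ excludes arrays containing an empty element: there A raises IndexError (c[0])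
-- for color 'black'/'white', and for other colors A's stripping of the empty elements
-- by the final remove loop is an artefact B does not reproduce (B returns a plain copy).
def Pre_on_castle (array : List (List String)) (_opponent_color : String) : Prop :=
  ∀ c ∈ array, c ≠ []
instance (array : List (List String)) (opponent_color : String) : Decidable (Pre_on_castle array opponent_color) := by unfold Pre_on_castle; infer_instance

def pvWitness_on_castle : List (List String) × String := ([["h8", "R"], ["e8", "K"], ["d4", "P"]], "black")

def Spec_on_castle (array : List (List String)) (opponent_color : String) (out : List (List String)) : Prop := out = on_castle_alt array opponent_color
instance (array : List (List String)) (opponent_color : String) (out : List (List String)) : Decidable (Spec_on_castle array opponent_color out) := by unfold Spec_on_castle; infer_instance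

-- ===== CLAIM (what is proved, stated in full; the proofs are below) =====
def Claim_equal_on_castle : Prop := ∀ (array : List (List String)) (opponent_color : String), Dom_on_castle array opponent_color → Pre_on_castle array opponent_color → Spec_on_castle array opponent_color (on_castle array opponent_color)

-- ===== LEMMAS AND PROOFS =====

-- A's single-pass flag loop computes the two 'any's
theorem pvFoldFlags (P Q : List String → Bool) (array : List (List String)) (b1 b2 : Bool) :
    array.foldl (fun f c => (f.1 || P c, f.2 || Q c)) (b1, b2)
      = (b1 || array.any P, b2 || array.any Q) := by
  induction array generalizing b1 b2 with
  | nil => simp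
  | cons c rest ih => simp [ih, Bool.or_assoc]

-- blank-then-remove equals one filtering pass (no original element is [])
theorem pvBlankRemove (a b : String) (array : List (List String))
    (h : ∀ c ∈ array, c ≠ []) :
    pvRemoveBlanks (array.map (fun c => if pvFirst c ≠ a ∧ pvFirst c ≠ b then [] else c))
      = array.filter (fun c => pvFirst c = a || pvFirst c = b) := by
  induction array with
  | nil => rfl
  | cons c rest ih =>
    have hc : c ≠ [] := h c (List.mem_cons_self)
    have hr := ih (fun d hd => h d (List.mem_cons_of_mem _ hd))
    by_cases hcond : pvFirst c ≠ a ∧ pvFirst c ≠ b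
    · simp only [List.map_cons, if_pos hcond, pvRemoveBlanks, hr,
        List.filter_cons]
      have : (pvFirst c = a || pvFirst c = b) = false := by
        obtain ⟨h1, h2⟩ := hcond; simp [h1, h2]
      simp [this]
    · simp only [List.map_cons, if_neg hcond, pvRemoveBlanks, if_neg hc, hr,
        List.filter_cons]
      have : (pvFirst c = a || pvFirst c = b) = true := by
        by_cases h1 : pvFirst c = a <;> by_cases h2 : pvFirst c = b <;> simp_all
      simp [this]

theorem pvRemoveBlanks_id (array : List (List String)) (h : ∀ c ∈ array, c ≠ []) :
    pvRemoveBlanks array = array := by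
  induction array with
  | nil => rfl
  | cons c rest ih =>
    simp [pvRemoveBlanks, h c List.mem_cons_self,
      ih (fun d hd => h d (List.mem_cons_of_mem _ hd))]

theorem pvContainsAny (array : List (List String)) (s : String) :
    PySem.Set.contains (PySem.Set.ofList (array.map pvFirst)) s
      = array.any (fun c => pvFirst c = s) := by
  rcases hb : array.any (fun c => pvFirst c = s) with _ | _
  · simp only [List.any_eq_false, decide_eq_true_eq] at hb
    rcases hc : PySem.Set.contains (PySem.Set.ofList (array.map pvFirst)) s with _ | _
    · rfl
    · have := (PySem.Set.contains_iff _ _).mp hc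
      rw [PySem.Set.mem_ofList] at this
      obtain ⟨c, hcmem, hceq⟩ := List.mem_map.mp this
      exact absurd hceq (by simpa using hb c hcmem)
  · simp only [List.any_eq_true, decide_eq_true_eq] at hb
    obtain ⟨c, hcmem, hceq⟩ := hb
    rw [PySem.Set.contains_iff, PySem.Set.mem_ofList]
    exact List.mem_map.mpr ⟨c, hcmem, hceq⟩

-- ===== VERDICT (by name: the statement is the Claim_ definition above) =====
theorem on_castle_spec : Claim_equal_on_castle := by
  intro array opponent_color _ hpre
  unfold Spec_on_castle on_castle on_castle_alt pvTable
  by_cases hb : opponent_color = "black"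
  · simp only [hb, pvFoldFlags, Bool.false_or, pvContainsAny]
    rcases hk : array.any (fun c => pvFirst c = "h8") with _ | _ <;>
      rcases hq : array.any (fun c => pvFirst c = "a8") with _ | _ <;>
        simp [hk, hq, pvBlankRemove _ _ _ hpre, pvRemoveBlanks_id _ hpre]
  · by_cases hw : opponent_color = "white"
    · simp only [hw, if_neg (by decide : ¬("white" = "black")),
        pvFoldFlags, Bool.false_or, pvContainsAny]
      rcases hk : array.any (fun c => pvFirst c = "h1") with _ | _ <;>
        rcases hq : array.any (fun c => pvFirst c = "a1") with _ | _ <;>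
          simp [hk, hq, pvBlankRemove _ _ _ hpre, pvRemoveBlanks_id _ hpre]
    · simp [hb, hw, pvRemoveBlanks_id _ hpre]
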